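-- pv_equiv track=rewrite | github.com/Mai-xiyu/VoxelForge | io_formats/nbt_encoder.py | encode_palette
-- ===== SOURCE A (Python) =====
-- from typing import Any, BinaryIO, Dict, List, Optional, Tuple, Union
--
-- def encode_palette(block_ids: List[str]) -> Tuple[Dict[str, int], List[str]]:
--     """
--     创建方块调色板映射。
--
--     Returns
--     -------
--     (palette_map, palette_list)
--         palette_map: block_id → index
--         palette_list: 有序列表
--     """
--     unique = list(dict.fromkeys(block_ids))  # 保持顺序
--     # 确保 minecraft:air 在索引 0
--     if "minecraft:air" not in unique:
--         unique.insert(0, "minecraft:air")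
--     elif unique[0] != "minecraft:air":
--         unique.remove("minecraft:air")
--         unique.insert(0, "minecraft:air")
--
--     palette_map = {bid: idx for idx, bid in enumerate(unique)}
--     return palette_map, unique
-- ===== SOURCE B (Python) =====
-- def encode_palette(block_ids):
--     """
--     创建方块调色板映射。
--
--     Returns
--     -------
--     (palette_map, palette_list)
--         palette_map: block_id → index
--         palette_list: 有序列表
--     """
--     air = "minecraft:air"
--     first = {}
--     for i, bid in enumerate(block_ids):
--         if bid not in first:
--             first[bid] = i
--     first[air] = -1
--     palette_list = sorted(first, key=first.__getitem__)
--     palette_map = {bid: idx for idx, bid in enumerate(palette_list)}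
--     return palette_map, palette_list
-- ===== Notes on version B (the rewrite author's own statement) =====
-- stated objective: alternative
-- what changed: B replaces A's dict.fromkeys dedup plus conditional remove/insert air-fixup by a different algorithm: it records each id's first-occurrence index in a dict, assigns air the index -1, and obtains the palette by sorting the keys by that index; the map-then-sort replaces A's ordered dedup and list surgery.
import Mathlib
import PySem

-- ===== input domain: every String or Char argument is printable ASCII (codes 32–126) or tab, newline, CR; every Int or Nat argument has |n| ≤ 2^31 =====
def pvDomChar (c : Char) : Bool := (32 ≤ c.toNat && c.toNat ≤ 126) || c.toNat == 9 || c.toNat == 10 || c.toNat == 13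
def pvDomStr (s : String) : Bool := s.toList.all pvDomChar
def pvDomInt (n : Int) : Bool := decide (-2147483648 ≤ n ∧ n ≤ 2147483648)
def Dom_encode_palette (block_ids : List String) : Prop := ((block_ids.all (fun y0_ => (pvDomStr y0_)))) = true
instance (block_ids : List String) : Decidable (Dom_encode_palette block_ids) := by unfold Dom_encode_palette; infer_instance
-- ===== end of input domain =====

-- B records each id's first-occurrence index in a dict, gives air index -1, and sorts the
-- keys by that index, instead of A's dedup followed by a conditional remove/insert fixup
-- (objective: alternative).


-- ===== PORT A =====
def encode_palette (block_ids : List String) : (List (String × Int)) × List String :=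
  let unique := PySem.List.dedup block_ids
  let unique :=
    if "minecraft:air" ∉ unique then
      "minecraft:air" :: unique
    else if PySem.List.pyGet? unique 0 ≠ some "minecraft:air" then
      -- remove? is some here since "minecraft:air" ∈ unique; getD only totalizes
      "minecraft:air" :: ((PySem.List.remove? unique "minecraft:air").getD unique)
    else unique
  let palette_map :=
    ((PySem.List.enumerate unique).foldl
      (fun d p => PySem.Dict.insert d p.2 p.1) PySem.Dict.empty).items
  (palette_map, unique)

-- ===== PORT B =====
def encode_palette_alt (block_ids : List String) : (List (String × Int)) × List String :=
  let first := (PySem.List.enumerate block_ids).foldl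
    (fun (d : PySem.Dict String Int) p =>
      if d.contains p.2 then d else d.insert p.2 p.1) PySem.Dict.empty
  let first := first.insert "minecraft:air" (-1)
  -- sorted(first, key=first.__getitem__): every sorted key is in first, so getD is exact here
  let palette_list := PySem.List.sorted first.keys (fun b => first.getD b 0) false
  let palette_map :=
    ((PySem.List.enumerate palette_list).foldl
      (fun d p => PySem.Dict.insert d p.2 p.1) PySem.Dict.empty).items
  (palette_map, palette_list)

-- ===== PRECONDITION & SPEC =====
def Spec_encode_palette (block_ids : List String) (out : (List (String × Int)) × List String) : Prop := out = encode_palette_alt block_ids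
instance (block_ids : List String) (out : (List (String × Int)) × List String) : Decidable (Spec_encode_palette block_ids out) := by unfold Spec_encode_palette; infer_instance

-- ===== CLAIM (what is proved, stated in full; the proofs are below) =====
def Claim_equal_encode_palette : Prop := ∀ (block_ids : List String), Dom_encode_palette block_ids → Spec_encode_palette block_ids (encode_palette block_ids)

-- ===== LEMMAS AND PROOFS =====

-- proof-only intermediate: first occurrences of xs not already in s, in order
def pvNew (xs : List String) (s : List String) : List String :=
  match xs with
  | [] => []
  | x :: t => if x ∈ s then pvNew t s else x :: pvNew t (s ++ [x])

-- proof-only intermediate: first occurrences paired with their index (counting from n)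
def pvFirst (xs : List String) (n : Int) (s : List String) : List (String × Int) :=
  match xs with
  | [] => []
  | x :: t => if x ∈ s then pvFirst t (n + 1) s else (x, n) :: pvFirst t (n + 1) (s ++ [x])

theorem foldl_add_eq (xs : List String) (s : PySem.Set String) :
    xs.foldl PySem.Set.add s = s ++ pvNew xs s := by
  induction xs generalizing s with
  | nil => simp [pvNew]
  | cons x t ih =>
    simp only [List.foldl_cons, pvNew]
    by_cases hx : x ∈ s
    · rw [if_pos hx]
      have : PySem.Set.add s x = s := by
        simp [PySem.Set.add, PySem.Set.contains, hx]
      rw [this, ih s]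
    · rw [if_neg hx]
      have : PySem.Set.add s x = s ++ [x] := by
        simp [PySem.Set.add, PySem.Set.contains, hx]
      rw [this, ih (s ++ [x])]
      simp

theorem pvNew_nodup (xs : List String) : (pvNew xs []).Nodup := by
  have h : pvNew xs [] = PySem.Set.ofList xs := by
    rw [PySem.Set.ofList_eq_foldl, foldl_add_eq xs []]; simp
  rw [h]
  exact PySem.Set.nodup_ofList xs

-- A's palette list in closed form: air, then first occurrences with air filtered out
theorem A_list (xs : List String) :
    (encode_palette xs).2
      = "minecraft:air" :: (pvNew xs []).filter (· ≠ "minecraft:air") := by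
  have hded : PySem.List.dedup xs = pvNew xs [] := by
    rw [PySem.List.dedup_eq_ofList, PySem.Set.ofList_eq_foldl, foldl_add_eq xs []]
    simp
  have hnodup : (pvNew xs []).Nodup := pvNew_nodup xs
  simp only [encode_palette, hded]
  by_cases hmem : "minecraft:air" ∈ pvNew xs []
  · rw [if_neg (by simpa using hmem)]
    rcases hu : pvNew xs [] with _ | ⟨h, t⟩
    · simp [hu] at hmem
    · by_cases hh : h = "minecraft:air"
      · subst hh
        rw [if_neg (by simp [PySem.List.pyGet?, PySem.List.pyIdx?])]
        rw [List.filter_cons_of_neg (by simp)]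
        have : t.filter (· ≠ "minecraft:air") = t := by
          apply List.filter_eq_self.mpr
          intro b hb
          have : b ≠ "minecraft:air" := by
            intro hbe; subst hbe
            rw [hu] at hnodup
            exact (List.nodup_cons.mp hnodup).1 hb
          simp [this]
        rw [this]
      · rw [if_pos (by simp [PySem.List.pyGet?, PySem.List.pyIdx?, hh])]
        congr 1
        have hm : "minecraft:air" ∈ h :: t := by rw [← hu]; exact hmem
        rw [PySem.List.remove?_eq_some_erase _ _ hm]
        simp only [Option.getD_some]
        have hnd : (h :: t).Nodup := by rw [← hu]; exact hnodup
        rw [hnd.erase_eq_filter]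
        exact List.filter_congr (fun b _ => by rw [bne, Bool.eq_iff_iff]; simp)
  · rw [if_pos (by simpa using hmem)]
    congr 1
    exact (List.filter_eq_self.mpr (fun b hb => by
      have : b ≠ "minecraft:air" := fun h => hmem (h ▸ hb)
      simp [this])).symm

-- B's first-index loop, as items: it appends (id, first index) for each fresh id
theorem fold_items (xs : List String) (n : Int) (d : PySem.Dict String Int)
    (hnd : d.keys.Nodup) :
    ((PySem.List.enumerate xs n).foldl
      (fun (d : PySem.Dict String Int) p =>
        if d.contains p.2 then d else d.insert p.2 p.1) d).items
      = d.items ++ pvFirst xs n d.keys := by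
  induction xs generalizing n d with
  | nil => simp [PySem.List.enumerate, pvFirst]
  | cons x t ih =>
    rw [PySem.List.enumerate_cons, List.foldl_cons]
    simp only [pvFirst]
    by_cases hx : x ∈ d.keys
    · have hc : d.contains x = true := (PySem.Dict.contains_iff_mem_keys d x).mpr hx
      rw [if_pos hx]
      simp only [hc, if_true]
      exact ih (n + 1) d hnd
    · have hc : d.contains x = false := by
        cases hcb : d.contains x with
        | false => rfl
        | true => exact absurd ((PySem.Dict.contains_iff_mem_keys d x).mp hcb) hx
      rw [if_neg hx]
      simp only [hc, Bool.false_eq_true, if_false]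
      have hk : (d.insert x n).keys = d.keys ++ [x] := by
        apply PySem.Dict.keys_insert_of_not_contains
        exact hc
      have hi : (d.insert x n).items = d.items ++ [(x, n)] := by
        apply PySem.Dict.items_insert_of_not_contains
        exact hc
      rw [ih (n + 1) (d.insert x n) (by apply PySem.Dict.nodup_keys_insert; exact hnd), hi, hk]
      simp

theorem pvFirst_fst (xs : List String) (n : Int) (s : List String) :
    (pvFirst xs n s).map (·.1) = pvNew xs s := by
  induction xs generalizing n s with
  | nil => rfl
  | cons x t ih =>
    simp only [pvFirst, pvNew]
    by_cases hx : x ∈ s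
    · rw [if_pos hx, if_pos hx]; exact ih (n + 1) s
    · rw [if_neg hx, if_neg hx, List.map_cons]
      rw [ih (n + 1) (s ++ [x])]

theorem pvFirst_lb (xs : List String) (n : Int) (s : List String) :
    ∀ p ∈ pvFirst xs n s, n ≤ p.2 := by
  induction xs generalizing n s with
  | nil => simp [pvFirst]
  | cons x t ih =>
    simp only [pvFirst]
    by_cases hx : x ∈ s
    · rw [if_pos hx]
      exact fun p hp => le_trans (by omega) (ih (n + 1) s p hp)
    · rw [if_neg hx]
      intro p hp
      rcases List.mem_cons.mp hp with h1 | h2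
      · subst h1; simp
      · exact le_trans (by omega) (ih (n + 1) (s ++ [x]) p h2)

theorem pvFirst_pairwise (xs : List String) (n : Int) (s : List String) :
    (pvFirst xs n s).Pairwise (fun p q => p.2 < q.2) := by
  induction xs generalizing n s with
  | nil => simp [pvFirst]
  | cons x t ih =>
    simp only [pvFirst]
    by_cases hx : x ∈ s
    · rw [if_pos hx]; exact ih (n + 1) s
    · rw [if_neg hx]
      refine List.Pairwise.cons ?_ (ih (n + 1) (s ++ [x]))
      intro q hq
      have := pvFirst_lb t (n + 1) (s ++ [x]) q hq
      simp only
      omega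

-- B's palette list equals the same closed form
theorem B_list (xs : List String) :
    (encode_palette_alt xs).2
      = "minecraft:air" :: (pvNew xs []).filter (· ≠ "minecraft:air") := by
  have hF : ((PySem.List.enumerate xs 0).foldl
      (fun (d : PySem.Dict String Int) p =>
        if d.contains p.2 then d else d.insert p.2 p.1) PySem.Dict.empty).items
      = pvFirst xs 0 [] := by
    have := fold_items xs 0 PySem.Dict.empty (by simp [pysem])
    simpa [pysem] using this
  set F := (PySem.List.enumerate xs 0).foldl
      (fun (d : PySem.Dict String Int) p =>
        if d.contains p.2 then d else d.insert p.2 p.1) PySem.Dict.empty with hFdef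
  have hkeys : F.keys = pvNew xs [] := by
    show F.items.map (·.1) = pvNew xs []
    rw [hF, pvFirst_fst]
  have hknd : F.keys.Nodup := by rw [hkeys]; exact pvNew_nodup xs
  -- value of B's key function on a non-air palette entry
  have hkey : ∀ b ∈ pvNew xs [], b ≠ "minecraft:air" →
      (F.insert "minecraft:air" (-1)).getD b 0 = F.getD b 0 ∧ 0 ≤ F.getD b 0 := by
    intro b hb hbne
    constructor
    · exact PySem.Dict.getD_insert_of_ne F (-1) 0 hbne
    · rw [← pvFirst_fst xs 0 []] at hb
      rcases List.mem_map.mp hb with ⟨p, hp, hp1⟩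
      have : F.getD p.1 0 = p.2 :=
        PySem.Dict.getD_of_mem_items F (hF ▸ ((Prod.mk.eta (p := p)) ▸ hp)) hknd 0
      rw [← hp1, this]
      exact pvFirst_lb xs 0 [] p hp
  have hkeyair : (F.insert "minecraft:air" (-1)).getD "minecraft:air" 0 = -1 :=
    PySem.Dict.getD_insert_self F "minecraft:air" (-1) 0
  -- the target list is a strictly key-increasing rearrangement of the sorted keys
  have hperm : ("minecraft:air" :: (pvNew xs []).filter (· ≠ "minecraft:air")).Perm
      (F.insert "minecraft:air" (-1)).keys := by
    by_cases hair : "minecraft:air" ∈ pvNew xs []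
    · have : (F.insert "minecraft:air" (-1)).keys = pvNew xs [] := by
        rw [PySem.Dict.keys_insert_of_contains F (-1)
          ((PySem.Dict.contains_iff_mem_keys F _).mpr (hkeys ▸ hair))]
        exact hkeys
      rw [this]
      have he : (pvNew xs []).erase "minecraft:air"
          = (pvNew xs []).filter (· ≠ "minecraft:air") := by
        rw [(pvNew_nodup xs).erase_eq_filter]
        exact List.filter_congr (fun b _ => by rw [bne, Bool.eq_iff_iff]; simp)
      rw [← he]
      exact (List.perm_cons_erase hair).symm
    · have : (F.insert "minecraft:air" (-1)).keys = pvNew xs [] ++ ["minecraft:air"] := by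
        have hc : F.contains "minecraft:air" = false := by
          cases hcb : F.contains "minecraft:air" with
          | false => rfl
          | true => exact absurd (hkeys ▸ (PySem.Dict.contains_iff_mem_keys F _).mp hcb) hair
        rw [← hkeys]
        apply PySem.Dict.keys_insert_of_not_contains
        exact hc
      rw [this]
      rw [List.filter_eq_self.mpr (fun b hb => by
        have : b ≠ "minecraft:air" := fun h => hair (h ▸ hb)
        simp [this])]
      exact List.perm_append_comm (l₁ := ["minecraft:air"])
  have hpw : ("minecraft:air" :: (pvNew xs []).filter (· ≠ "minecraft:air")).Pairwise
      (fun a b => (F.insert "minecraft:air" (-1)).getD a 0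
        < (F.insert "minecraft:air" (-1)).getD b 0) := by
    refine List.Pairwise.cons ?_ ?_
    · intro b hb
      have hbmem := List.mem_of_mem_filter hb
      have hbne : b ≠ "minecraft:air" := by
        have := List.of_mem_filter hb; simpa using this
      rcases hkey b hbmem hbne with ⟨h1, h2⟩
      rw [hkeyair, h1]; omega
    · -- first-occurrence indices strictly increase along pvNew
      have h1 : (pvFirst xs 0 []).Pairwise
          (fun p q => F.getD p.1 0 < F.getD q.1 0) := by
        refine (pvFirst_pairwise xs 0 []).imp_of_mem ?_
        intro p q hp hq hlt
        have hgp : F.getD p.1 0 = p.2 :=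
          PySem.Dict.getD_of_mem_items F (hF ▸ ((Prod.mk.eta (p := p)) ▸ hp)) hknd 0
        have hgq : F.getD q.1 0 = q.2 :=
          PySem.Dict.getD_of_mem_items F (hF ▸ ((Prod.mk.eta (p := q)) ▸ hq)) hknd 0
        rw [hgp, hgq]; exact hlt
      have h2 : (pvNew xs []).Pairwise (fun a b => F.getD a 0 < F.getD b 0) := by
        rw [← pvFirst_fst xs 0 []]
        exact List.pairwise_map.mpr h1
      refine (h2.filter _).imp_of_mem ?_
      intro a b ha hb hlt
      have hane : a ≠ "minecraft:air" := by
        have := List.of_mem_filter ha; simpa using this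
      have hbne : b ≠ "minecraft:air" := by
        have := List.of_mem_filter hb; simpa using this
      rw [PySem.Dict.getD_insert_of_ne F (-1) 0 hane,
        PySem.Dict.getD_insert_of_ne F (-1) 0 hbne]
      exact hlt
  show PySem.List.sorted (F.insert "minecraft:air" (-1)).keys
      (fun b => (F.insert "minecraft:air" (-1)).getD b 0) false = _
  exact PySem.List.sorted_eq_of_perm_of_pairwise_lt _ _ _ hperm hpw

-- ===== VERDICT (by name: the statement is the Claim_ definition above) =====
theorem encode_palette_spec : Claim_equal_encode_palette := by
  intro xs _
  unfold Spec_encode_palette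
  have h : (encode_palette xs).2 = (encode_palette_alt xs).2 := by
    rw [A_list, B_list]
  simp only [encode_palette, encode_palette_alt] at h ⊢
  rw [h]
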